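-- pv_equiv track=rewrite | github.com/JuliaSivridi/python_LUT_coding | L11T4.py | HidasHakufunktio
-- ===== SOURCE A (Python) =====
-- def HidasHakufunktio(Numerot):
--     Luvut = ["",""]
--     Luvut[0] = 0  #Pienempi luku tallennetaan tähän
--     Luvut[1] = 0  #Suurempi luku tallennetaan tähän
--
--     Mini = Numerot[0]
--     Maxi = Numerot[0]
--
--     Loytyi = False
--     for Numero in Numerot:
--         Mini = Numero
--         for Numero2 in Numerot:
--             if (Numero2 > 3 * Mini):
--                 Luvut[1] = Numero2
--                 Luvut[0] = Mini
--                 Loytyi = True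
--                 break
--         if Loytyi == True:
--             break
--     return Luvut
-- ===== SOURCE B (Python) =====
-- def HidasHakufunktio(Numerot):
--     m = max(Numerot)
--     small = next((x for x in Numerot if m > 3 * x), None)
--     if small is None:
--         return [0, 0]
--     big = next(y for y in Numerot if y > 3 * small)
--     return [small, big]
-- ===== Notes on version B (the rewrite author's own statement) =====
-- stated objective: alternative
-- what changed: Replaced A's nested scan (for each element, rescan the whole list for a value exceeding 3x it) by three separate single passes: compute the maximum once, find the first element x with max > 3*x, then find the first element exceeding 3*x.
import Mathlib
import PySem

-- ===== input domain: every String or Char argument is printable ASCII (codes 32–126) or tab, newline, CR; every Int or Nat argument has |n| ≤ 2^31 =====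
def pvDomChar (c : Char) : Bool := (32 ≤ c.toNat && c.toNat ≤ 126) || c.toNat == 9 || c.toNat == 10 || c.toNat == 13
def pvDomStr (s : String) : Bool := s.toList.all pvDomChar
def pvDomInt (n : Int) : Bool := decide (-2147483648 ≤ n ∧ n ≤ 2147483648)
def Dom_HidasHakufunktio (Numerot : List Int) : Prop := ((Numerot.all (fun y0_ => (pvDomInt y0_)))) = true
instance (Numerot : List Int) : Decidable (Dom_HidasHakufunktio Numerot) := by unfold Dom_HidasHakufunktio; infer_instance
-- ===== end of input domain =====

-- B restructures A's nested rescan loops into three separate single passes (overall max, first small element, first big element); behaviour is identical on nonempty lists.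

-- ===== PORT A =====
-- inner 'for Numero2 in Numerot' loop: the first element > 3*Mini, with the break
def pvInnerA (mini : Int) : List Int → Option Int
  | [] => none
  | n :: t => if n > 3 * mini then some n else pvInnerA mini t

-- outer 'for Numero in Numerot' loop: once Loytyi becomes true A breaks and returns [Mini, Numero2]
def pvOuterA (all : List Int) : List Int → List Int
  | [] => [0, 0]
  | x :: t =>
    match pvInnerA x all with
    | some y => [x, y]
    | none => pvOuterA all t

-- A evaluates Numerot[0] first (IndexError on []; excluded by Pre_), then runs the nested loops
def HidasHakufunktio (Numerot : List Int) : List Int :=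
  match PySem.List.pyGet? Numerot 0 with
  | none => [0, 0]   -- unreachable under Pre_ (Python raises IndexError here)
  | some _ => pvOuterA Numerot Numerot

-- ===== PORT B =====
def HidasHakufunktio_alt (Numerot : List Int) : List Int :=
  match Numerot with
  | [] => [0, 0]   -- unreachable under Pre_ (Python's max([]) raises ValueError)
  | h :: t =>
    let m := t.foldl max h
    match (h :: t).find? (fun x => decide (m > 3 * x)) with
    | none => [0, 0]
    | some small =>
      match (h :: t).find? (fun y => decide (y > 3 * small)) with
      | none => [0, 0]   -- unreachable: m itself exceeds 3*small
      | some big => [small, big]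

-- ===== PRECONDITION & SPEC =====
-- Pre_ excludes only the empty list, on which Python A raises IndexError (Numerot[0]).
def Pre_HidasHakufunktio (Numerot : List Int) : Prop := Numerot ≠ []
instance (Numerot : List Int) : Decidable (Pre_HidasHakufunktio Numerot) := by unfold Pre_HidasHakufunktio; infer_instance
def pvWitness_HidasHakufunktio : List Int := [1]

def Spec_HidasHakufunktio (Numerot : List Int) (out : List Int) : Prop := out = HidasHakufunktio_alt Numerot
instance (Numerot : List Int) (out : List Int) : Decidable (Spec_HidasHakufunktio Numerot out) := by unfold Spec_HidasHakufunktio; infer_instance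

-- ===== CLAIM (what is proved, stated in full; the proofs are below) =====
def Claim_equal_HidasHakufunktio : Prop := ∀ (Numerot : List Int), Dom_HidasHakufunktio Numerot → Pre_HidasHakufunktio Numerot → Spec_HidasHakufunktio Numerot (HidasHakufunktio Numerot)

-- ===== LEMMAS AND PROOFS =====

-- A's inner loop is exactly List.find? with the same predicate
theorem pvInnerA_eq_find? (mini : Int) (l : List Int) :
    pvInnerA mini l = l.find? (fun n => decide (n > 3 * mini)) := by
  induction l with
  | nil => rfl
  | cons n t ih => simp [pvInnerA, List.find?]; split_ifs with h <;> simp [h, ih]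

theorem pvInnerA_none_iff (mini : Int) (l : List Int) :
    pvInnerA mini l = none ↔ ∀ y ∈ l, ¬ y > 3 * mini := by
  rw [pvInnerA_eq_find?, List.find?_eq_none]; simp

theorem foldl_max_mem (h : Int) (t : List Int) : t.foldl max h ∈ h :: t := by
  induction t generalizing h with
  | nil => simp
  | cons a t ih =>
    simp only [List.foldl_cons]
    rcases List.mem_cons.mp (ih (max h a)) with he | hm
    · rw [he]; rcases max_choice h a with hc | hc <;> simp [hc]
    · exact List.mem_cons_of_mem _ (List.mem_cons_of_mem _ hm)

theorem le_foldl_max (h : Int) (t : List Int) : ∀ y ∈ h :: t, y ≤ t.foldl max h := by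
  induction t generalizing h with
  | nil => simp
  | cons a t ih =>
    intro y hy
    simp only [List.foldl_cons]
    rcases List.mem_cons.mp hy with rfl | hy2
    · exact le_trans (le_max_left y a) (ih (max y a) _ (by simp))
    rcases List.mem_cons.mp hy2 with rfl | h3
    · exact le_trans (le_max_right h y) (ih (max h y) _ (by simp))
    · exact ih (max h a) y (List.mem_cons_of_mem _ h3)

-- A's inner loop succeeds on x exactly when the maximum exceeds 3*x
theorem pvInnerA_none_iff_max (h : Int) (t : List Int) (x : Int) :
    pvInnerA x (h :: t) = none ↔ ¬ (t.foldl max h > 3 * x) := by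
  rw [pvInnerA_none_iff]
  constructor
  · intro hall; exact hall _ (foldl_max_mem h t)
  · intro hm y hy hgt
    exact hm (lt_of_lt_of_le hgt (le_foldl_max h t y hy))

theorem pvOuterA_eq (h : Int) (t : List Int) (rest : List Int) :
    pvOuterA (h :: t) rest =
      match rest.find? (fun x => decide (t.foldl max h > 3 * x)) with
      | none => [0, 0]
      | some small =>
        match pvInnerA small (h :: t) with
        | some big => [small, big]
        | none => [0, 0] := by
  induction rest with
  | nil => rfl
  | cons x r ih =>
    simp only [pvOuterA, List.find?]
    by_cases hx : t.foldl max h > 3 * x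
    · simp only [hx, decide_true]
      cases hi : pvInnerA x (h :: t) with
      | none => exact absurd ((pvInnerA_none_iff_max h t x).mp hi) (by simpa using hx)
      | some y => simp
    · have hi : pvInnerA x (h :: t) = none := (pvInnerA_none_iff_max h t x).mpr hx
      simp only [hi, hx, decide_false]
      exact ih

-- ===== VERDICT (by name: the statement is the Claim_ definition above) =====
theorem HidasHakufunktio_spec : Claim_equal_HidasHakufunktio := by
  intro Numerot _ hpre
  unfold Spec_HidasHakufunktio HidasHakufunktio HidasHakufunktio_alt
  match Numerot, hpre with
  | h :: t, _ =>
    have hg : PySem.List.pyGet? (h :: t) 0 = some h := by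
      simp [PySem.List.pyGet?, PySem.List.pyIdx?]
    rw [hg, pvOuterA_eq]
    simp only [pvInnerA_eq_find?]
    cases hf : (h :: t).find? (fun x => decide (t.foldl max h > 3 * x)) with
    | none => simp
    | some small =>
      simp only [hf]
      cases (h :: t).find? (fun y => decide (y > 3 * small)) <;> rfl
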